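-- pv_equiv track=rewrite | github.com/laminazaman/RadoNumbers | rado_solver.py | toNumbers
-- ===== SOURCE A (Python) =====
-- k = 3 # number of colours
--
-- def toNumbers(model):
--     assert(len(model) % k == 0)
--     cols = ["?"] * (len(model)//k)
--     for m in model:
--         if m > 0:
--             assert(cols[(m-1)//k] == "?")
--             cols[(m-1)//k] = str((m-1) % k)
--     return "".join(cols)
-- ===== SOURCE B (Python) =====
-- k = 3 # number of colours
--
-- def toNumbers(model):
--     assert(len(model) % k == 0)
--     pairs = sorted((((m - 1) // k, (m - 1) % k) for m in model if m > 0),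
--                    key=lambda p: p[0])
--     out = []
--     j = 0
--     for i in range(len(model) // k):
--         if j < len(pairs) and pairs[j][0] == i:
--             out.append(str(pairs[j][1]))
--             j += 1
--             assert(j == len(pairs) or pairs[j][0] != i)  # no colour clash on cell i
--         else:
--             out.append("?")
--     assert(j == len(pairs))  # every positive literal named a cell in range
--     return "".join(out)
-- ===== Notes on version B (the rewrite author's own statement) =====
-- stated objective: alternative
-- what changed: B sorts the (cell, colour) pairs of the positive literals by cell and merges them against the index range in one ordered two-pointer scan, instead of A's random-access writes into a pre-filled sentinel list.
import Mathlib
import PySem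

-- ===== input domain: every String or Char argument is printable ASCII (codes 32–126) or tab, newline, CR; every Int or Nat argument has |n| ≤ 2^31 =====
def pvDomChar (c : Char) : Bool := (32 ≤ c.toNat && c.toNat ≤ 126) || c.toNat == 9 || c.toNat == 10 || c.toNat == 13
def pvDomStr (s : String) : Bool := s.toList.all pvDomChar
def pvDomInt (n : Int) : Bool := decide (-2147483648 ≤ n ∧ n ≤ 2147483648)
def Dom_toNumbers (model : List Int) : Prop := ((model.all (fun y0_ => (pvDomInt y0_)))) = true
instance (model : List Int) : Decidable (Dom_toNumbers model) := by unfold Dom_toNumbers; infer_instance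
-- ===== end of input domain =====

-- B is a different algorithm: it sorts the (cell, colour) pairs of the positive literals and
-- merges them against the index range in one ordered scan, instead of A's random-access writes
-- into a pre-filled sentinel list (objective: alternative).

-- ===== PORT A =====
def toNumbers (model : List Int) : String :=
  let cols : List String := List.replicate (model.length / 3) "?"
  let cols := model.foldl (fun cols m =>
    if 0 < m then
      cols.set (PySem.Int.floordiv (m - 1) 3).toNat (PySem.Int.toStr (PySem.Int.mod (m - 1) 3))
    else cols) cols
  PySem.Str.join "" cols

-- ===== PORT B =====
def toNumbers_alt (model : List Int) : String :=
  let pairs := PySem.List.sorted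
    ((model.filter (fun m => 0 < m)).map
      (fun m => (PySem.Int.floordiv (m - 1) 3, PySem.Int.mod (m - 1) 3)))
    (fun p => p.1)
  let st := (PySem.List.pyRange 0 ((model.length / 3 : Nat) : Int) 1).foldl
    (fun (st : List String × Nat) i =>
      if st.2 < pairs.length ∧ (PySem.List.pyGetD pairs (st.2 : Int) (0, 0)).1 = i then
        (st.1 ++ [PySem.Int.toStr (PySem.List.pyGetD pairs (st.2 : Int) (0, 0)).2], st.2 + 1)
      else (st.1 ++ ["?"], st.2)) ([], 0)
  PySem.Str.join "" st.1

-- ===== PRECONDITION & SPEC =====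
-- Pre_ excludes exactly the inputs where the Python A raises: length not a multiple of 3
-- (AssertionError), a positive literal exceeding the length (IndexError on cols[(m-1)//3]),
-- or two positive literals mapping to the same cell (AssertionError on the '?' check).
def Pre_toNumbers (model : List Int) : Prop :=
  model.length % 3 = 0 ∧
  (∀ m ∈ model, 0 < m → m ≤ (model.length : Int)) ∧
  ((model.filter (fun m => 0 < m)).map (fun m => PySem.Int.floordiv (m - 1) 3)).Nodup

instance (model : List Int) : Decidable (Pre_toNumbers model) := by
  unfold Pre_toNumbers; infer_instance

def pvWitness_toNumbers : List Int := [1, 5, -1, -2, -3, -4]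

def Spec_toNumbers (model : List Int) (out : String) : Prop := out = toNumbers_alt model
instance (model : List Int) (out : String) : Decidable (Spec_toNumbers model out) := by unfold Spec_toNumbers; infer_instance

-- ===== CLAIM (what is proved, stated in full; the proofs are below) =====
def Claim_equal_toNumbers : Prop := ∀ (model : List Int), Dom_toNumbers model → Pre_toNumbers model → Spec_toNumbers model (toNumbers model)

-- ===== LEMMAS AND PROOFS =====

-- the loop body of port A, and the dict-building ghost loop used to characterise it
def pvStepA (cols : List String) (m : Int) : List String :=
  if 0 < m then
    cols.set (PySem.Int.floordiv (m - 1) 3).toNat (PySem.Int.toStr (PySem.Int.mod (m - 1) 3))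
  else cols

def pvStepB (d : PySem.Dict Int String) (m : Int) : PySem.Dict Int String :=
  if 0 < m then
    d.insert (PySem.Int.floordiv (m - 1) 3) (PySem.Int.toStr (PySem.Int.mod (m - 1) 3))
  else d

-- the loop body of port B's merge scan, and the lookup it realises
def pvStepC (pairs : List (Int × Int)) (st : List String × Nat) (i : Int) : List String × Nat :=
  if st.2 < pairs.length ∧ (PySem.List.pyGetD pairs (st.2 : Int) (0, 0)).1 = i then
    (st.1 ++ [PySem.Int.toStr (PySem.List.pyGetD pairs (st.2 : Int) (0, 0)).2], st.2 + 1)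
  else (st.1 ++ ["?"], st.2)

def pvLook (ps : List (Int × Int)) (i : Int) : String :=
  match ps.find? (fun p => p.1 == i) with
  | some p => PySem.Int.toStr p.2
  | none => "?"

theorem pvStepA_length (cols : List String) (m : Int) :
    (pvStepA cols m).length = cols.length := by
  unfold pvStepA; split <;> simp

theorem pv_foldA_length (ms : List Int) (cols : List String) :
    (ms.foldl pvStepA cols).length = cols.length := by
  induction ms generalizing cols with
  | nil => rfl
  | cons m t ih => simp only [List.foldl_cons, ih, pvStepA_length]

theorem pv_floordiv_nonneg (m : Int) (hm : 0 < m) :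
    0 ≤ PySem.Int.floordiv (m - 1) 3 := by
  rw [PySem.Int.floordiv_eq_ediv_of_pos (by norm_num)]
  exact Int.ediv_nonneg (by omega) (by norm_num)

theorem pvStep_rel (cols : List String) (d : PySem.Dict Int String) (m : Int)
    (h : ∀ i : Nat, i < cols.length → cols[i]? = some (d.getD (i : Int) "?")) :
    ∀ i : Nat, i < cols.length → (pvStepA cols m)[i]? = some ((pvStepB d m).getD (i : Int) "?") := by
  intro i hi
  unfold pvStepA pvStepB
  by_cases hm : 0 < m
  · simp only [if_pos hm]
    have hj := pv_floordiv_nonneg m hm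
    rw [PySem.Dict.getD_insert]
    by_cases he : i = (PySem.Int.floordiv (m - 1) 3).toNat
    · subst he
      rw [List.getElem?_set_self hi, if_pos (by omega)]
    · rw [List.getElem?_set_ne (by omega), if_neg (by omega)]
      exact h i hi
  · simp only [if_neg hm]; exact h i hi

theorem pv_fold_rel (ms : List Int) (cols : List String) (d : PySem.Dict Int String)
    (h : ∀ i : Nat, i < cols.length → cols[i]? = some (d.getD (i : Int) "?")) :
    ∀ i : Nat, i < cols.length →
      (ms.foldl pvStepA cols)[i]? = some ((ms.foldl pvStepB d).getD (i : Int) "?") := by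
  induction ms generalizing cols d with
  | nil => exact h
  | cons m t ih =>
    intro i hi
    simp only [List.foldl_cons]
    exact ih (pvStepA cols m) (pvStepB d m)
      (fun j hj => pvStep_rel cols d m h j (by rw [pvStepA_length] at hj; exact hj))
      i (by rw [pvStepA_length]; exact hi)

-- A's result, characterised as a per-cell dictionary lookup (unconditional)
theorem pv_A_dict (model : List Int) :
    toNumbers model = PySem.Str.join ""
      ((List.range (model.length / 3)).map
        (fun i : Nat => (model.foldl pvStepB PySem.Dict.empty).getD (i : Int) "?")) := by
  unfold toNumbers
  have hcols : model.foldl pvStepA (List.replicate (model.length / 3) "?") =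
      (List.range (model.length / 3)).map
        (fun i : Nat => (model.foldl pvStepB PySem.Dict.empty).getD (i : Int) "?") := by
    apply List.ext_getElem?
    intro i
    by_cases hi : i < model.length / 3
    · rw [pv_fold_rel model _ PySem.Dict.empty
        (fun j hj => by
          simp only [List.length_replicate] at hj
          simp [hj, PySem.Dict.getD_empty])
        i (by simpa using hi)]
      rw [List.getElem?_map, List.getElem?_range hi]
      rfl
    · rw [List.getElem?_eq_none (by rw [pv_foldA_length]; simpa using not_lt.mp hi),
          List.getElem?_eq_none (by simpa using not_lt.mp hi)]
  exact congrArg (PySem.Str.join "") hcols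

-- under Pre_, the dictionary lookup is the (unique-match) lookup in the sorted pair list
theorem pv_getD_eq_look (model : List Int) (h : Pre_toNumbers model) (i : Int) :
    (model.foldl pvStepB PySem.Dict.empty).getD i "?" =
      pvLook (PySem.List.sorted
        ((model.filter (fun m => 0 < m)).map
          (fun m => (PySem.Int.floordiv (m - 1) 3, PySem.Int.mod (m - 1) 3)))
        (fun p => p.1)) i := by
  obtain ⟨-, -, hnd⟩ := h
  set l := model.filter (fun m => 0 < m) with hl
  set pairs0 := l.map (fun m => (PySem.Int.floordiv (m - 1) 3, PySem.Int.mod (m - 1) 3)) with hp0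
  have hfold : model.foldl pvStepB PySem.Dict.empty =
      l.foldl (fun d m => d.insert (PySem.Int.floordiv (m - 1) 3)
        (PySem.Int.toStr (PySem.Int.mod (m - 1) 3))) PySem.Dict.empty := by
    rw [hl, List.foldl_filter]
    congr 1
    funext d m
    simp [pvStepB]
  have hitems : (model.foldl pvStepB PySem.Dict.empty).items =
      l.map (fun m => (PySem.Int.floordiv (m - 1) 3,
        PySem.Int.toStr (PySem.Int.mod (m - 1) 3))) := by
    rw [hfold, PySem.Dict.items_foldl_insert_fresh _ _ _ _ (by simp [PySem.Dict.contains_empty]) hnd]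
    simp [show (PySem.Dict.empty : PySem.Dict Int String).items = [] from rfl]
  have hkeys : (model.foldl pvStepB PySem.Dict.empty).keys =
      l.map (fun m => PySem.Int.floordiv (m - 1) 3) := by
    show (model.foldl pvStepB PySem.Dict.empty).items.map (·.1) = _
    rw [hitems, List.map_map]; rfl
  have hknd : (model.foldl pvStepB PySem.Dict.empty).keys.Nodup := by rw [hkeys]; exact hnd
  have hmemp : ∀ p, p ∈ PySem.List.sorted pairs0 (fun p => p.1) ↔ p ∈ pairs0 := by
    intro p; exact PySem.List.mem_sorted pairs0 (fun p => p.1) false p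
  unfold pvLook
  cases hf : (PySem.List.sorted pairs0 (fun p => p.1)).find? (fun p => p.1 == i) with
  | some p =>
    have hpi : p.1 = i := by
      have := List.find?_some hf; simpa using this
    have hpmem : p ∈ pairs0 := (hmemp p).mp (List.mem_of_find?_eq_some hf)
    obtain ⟨m, hm, hpm⟩ := List.mem_map.mp hpmem
    have hf1 : PySem.Int.floordiv (m - 1) 3 = i := by rw [← hpi]; exact congrArg Prod.fst hpm
    have hf2 : PySem.Int.mod (m - 1) 3 = p.2 := congrArg Prod.snd hpm
    have hmem2 : (i, PySem.Int.toStr p.2) ∈ (model.foldl pvStepB PySem.Dict.empty).items := by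
      rw [hitems]
      exact List.mem_map.mpr ⟨m, hm, by rw [hf1, hf2]⟩
    exact PySem.Dict.getD_of_mem_items _ hmem2 hknd "?"
  | none =>
    have hni : i ∉ (model.foldl pvStepB PySem.Dict.empty).keys := by
      rw [hkeys]
      intro hmem
      obtain ⟨m, hm, hkm⟩ := List.mem_map.mp hmem
      have hpm : (i, PySem.Int.mod (m - 1) 3) ∈ pairs0 := by
        rw [hp0]
        exact List.mem_map.mpr ⟨m, hm, by rw [hkm]⟩
      have := List.find?_eq_none.mp hf _ ((hmemp _).mpr hpm)
      simp at this
    apply PySem.Dict.getD_of_not_contains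
    rw [PySem.Dict.contains_eq_decide_mem_keys]
    simpa using hni
-- the merge scan over the index range produces exactly the per-cell lookups
theorem pv_scan (pairs : List (Int × Int)) (b : Int) :
    ∀ (n : Nat) (a : Int) (rest : List (Int × Int)) (j : Nat) (acc : List String),
      (b - a).toNat = n →
      pairs.drop j = rest →
      rest.Pairwise (fun p q => p.1 < q.1) →
      (∀ p ∈ rest, a ≤ p.1 ∧ p.1 < b) →
      (PySem.List.pyRange a b 1).foldl (pvStepC pairs) (acc, j)
        = (acc ++ (PySem.List.pyRange a b 1).map (pvLook rest), j + rest.length) := by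
  intro n
  induction n with
  | zero =>
    intro a rest j acc hn hdrop hsor hb
    have hba : b ≤ a := by omega
    have hrest : rest = [] := by
      cases rest with
      | nil => rfl
      | cons p t => exact absurd (hb p (by simp)) (by omega)
    subst hrest
    rw [PySem.List.pyRange_one_eq_nil hba]
    simp
  | succ n ih =>
    intro a rest j acc hn hdrop hsor hb
    have hab : a < b := by omega
    rw [PySem.List.pyRange_one_cons hab, List.foldl_cons, List.map_cons]
    cases rest with
    | nil =>
      have hlen : pairs.length ≤ j := List.drop_eq_nil_iff.mp hdrop
      have hstep : pvStepC pairs (acc, j) a = (acc ++ ["?"], j) := by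
        unfold pvStepC
        rw [if_neg (by intro h; omega)]
      rw [hstep, ih (a + 1) [] j (acc ++ ["?"]) (by omega) hdrop (by simp) (by simp)]
      simp [pvLook]
    | cons p rest' =>
      have hlen : j < pairs.length := by
        by_contra hc
        rw [List.drop_eq_nil_iff.mpr (by omega)] at hdrop
        exact List.cons_ne_nil p rest' hdrop.symm
      have hget : PySem.List.pyGetD pairs (j : Int) ((0 : Int), (0 : Int)) = p := by
        rw [PySem.List.pyGetD_natCast]
        have h0 : pairs[j]? = some p := by
          have h1 : (pairs.drop j)[0]? = pairs[j + 0]? := List.getElem?_drop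
          rw [hdrop] at h1
          simpa using h1.symm
        rw [List.getD_eq_getElem?_getD, h0]
        rfl
      have hple : a ≤ p.1 ∧ p.1 < b := hb p (by simp)
      by_cases hpa : p.1 = a
      · have hstep : pvStepC pairs (acc, j) a =
            (acc ++ [PySem.Int.toStr p.2], j + 1) := by
          unfold pvStepC
          rw [if_pos ⟨hlen, by rw [hget, hpa]⟩, hget]
        have hdrop' : pairs.drop (j + 1) = rest' := by
          have : pairs.drop (j + 1) = (pairs.drop j).drop 1 := by
            rw [List.drop_drop]
          rw [this, hdrop]; rfl
        have hlt := List.pairwise_cons.mp hsor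
        rw [hstep, ih (a + 1) rest' (j + 1) (acc ++ [PySem.Int.toStr p.2]) (by omega) hdrop'
          hlt.2
          (fun q hq => ⟨by have := hlt.1 q hq; omega, (hb q (by simp [hq])).2⟩)]
        have hhead : pvLook (p :: rest') a = PySem.Int.toStr p.2 := by
          unfold pvLook
          rw [List.find?_cons_of_pos (by simp [hpa])]
        have hmap : (PySem.List.pyRange (a + 1) b 1).map (pvLook (p :: rest'))
            = (PySem.List.pyRange (a + 1) b 1).map (pvLook rest') := by
          apply List.map_congr_left
          intro i hi
          have hia : a + 1 ≤ i := ((PySem.List.mem_pyRange_one).mp hi).1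
          unfold pvLook
          rw [List.find?_cons_of_neg (by simp; omega)]
        rw [hhead, hmap]
        simp [List.append_assoc]
        omega
      · have hap : a < p.1 := by omega
        have hstep : pvStepC pairs (acc, j) a = (acc ++ ["?"], j) := by
          unfold pvStepC
          rw [if_neg (by rw [hget]; intro h; exact hpa h.2)]
        have hlt := List.pairwise_cons.mp hsor
        rw [hstep, ih (a + 1) (p :: rest') j (acc ++ ["?"]) (by omega) hdrop hsor
          (fun q hq => by
            rcases List.mem_cons.mp hq with h | h
            · exact ⟨by rw [h]; omega, by rw [h]; exact hple.2⟩
            · have := hlt.1 q h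
              exact ⟨by omega, (hb q (by simp [h])).2⟩)]
        have hhead : pvLook (p :: rest') a = "?" := by
          unfold pvLook
          rw [List.find?_eq_none.mpr]
          intro q hq
          rcases List.mem_cons.mp hq with h | h
          · simp [h]; omega
          · have := hlt.1 q h; simp; omega
        rw [hhead]
        simp [List.append_assoc]

theorem pv_toNumbers_eq (model : List Int) (h : Pre_toNumbers model) :
    toNumbers model = toNumbers_alt model := by
  obtain ⟨hmod, hbnd, hnd⟩ := h
  unfold toNumbers_alt
  set pairs0 := (model.filter (fun m => 0 < m)).map
      (fun m => (PySem.Int.floordiv (m - 1) 3, PySem.Int.mod (m - 1) 3)) with hp0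
  set pairs := PySem.List.sorted pairs0 (fun p => p.1) with hps
  have hperm : pairs.Perm pairs0 := PySem.List.sorted_perm pairs0 (fun p => p.1) false
  have hmapnd : (pairs.map (fun p => p.1)).Nodup := by
    refine (List.Perm.nodup_iff (List.Perm.map _ hperm)).mpr ?_
    rw [hp0, List.map_map]
    exact hnd
  have hsor : pairs.Pairwise (fun p q => p.1 < q.1) := by
    have hle : pairs.Pairwise (fun p q => p.1 ≤ q.1) :=
      PySem.List.sorted_pairwise pairs0 (fun p => p.1)
    have hne : pairs.Pairwise (fun p q => p.1 ≠ q.1) := List.pairwise_map.mp hmapnd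
    exact (hle.and hne).imp (fun hpq => lt_of_le_of_ne hpq.1 hpq.2)
  have h3n : (model.length / 3) * 3 = model.length :=
    Nat.div_mul_cancel (Nat.dvd_of_mod_eq_zero hmod)
  have hbounds : ∀ p ∈ pairs, (0 : Int) ≤ p.1 ∧ p.1 < ((model.length / 3 : Nat) : Int) := by
    intro p hp
    have hp0m : p ∈ pairs0 := (PySem.List.mem_sorted pairs0 (fun p => p.1) false p).mp hp
    obtain ⟨m, hm, hpm⟩ := List.mem_map.mp hp0m
    have hmpos : 0 < m := by
      have := List.of_mem_filter hm
      simpa using this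
    have hmle : m ≤ (model.length : Int) := hbnd m (List.mem_of_mem_filter hm) hmpos
    constructor
    · rw [← hpm]; exact pv_floordiv_nonneg m hmpos
    · rw [← hpm]
      rw [PySem.Int.floordiv_lt_iff_lt_mul (by norm_num)]
      have : ((model.length / 3 : Nat) : Int) * 3 = (model.length : Int) := by
        exact_mod_cast congrArg (fun x : Nat => (x : Int)) h3n
      omega
  have hscan := pv_scan pairs ((model.length / 3 : Nat) : Int)
      ((model.length / 3 : Nat)) 0 pairs 0 [] (by omega) (by simp) hsor hbounds
  show toNumbers model = PySem.Str.join ""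
      ((PySem.List.pyRange 0 ((model.length / 3 : Nat) : Int) 1).foldl (pvStepC pairs) ([], 0)).1
  rw [hscan]
  rw [pv_A_dict model]
  have hidx : PySem.List.pyRange 0 ((model.length / 3 : Nat) : Int) 1
      = (List.range (model.length / 3)).map (fun k : Nat => (k : Int)) := by
    rw [PySem.List.pyRange_one]
    have h0 : (((model.length / 3 : Nat) : Int) - 0).toNat = model.length / 3 := by omega
    rw [h0]
    apply List.map_congr_left
    intro k hk
    omega
  congr 1
  rw [hidx, List.map_map, List.nil_append]
  apply List.map_congr_left
  intro k hk
  simp only [Function.comp_apply]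
  exact pv_getD_eq_look model ⟨hmod, hbnd, hnd⟩ (k : Int)

-- ===== VERDICT (by name: the statement is the Claim_ definition above) =====
theorem toNumbers_spec : Claim_equal_toNumbers := by
  intro model _ h
  exact pv_toNumbers_eq model h
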